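-- pv_equiv track=rewrite | github.com/eddy80524/dental-quiz-app | my_llm_app/utils.py | _image_block_latex
-- ===== SOURCE A (Python) =====
-- from typing import Dict, Any, List, Optional, Union
--
-- def _image_block_latex(file_list: List[str]) -> str:
--     """1枚 -> 0.45幅、2枚 -> 0.45×2、3枚以上 -> 2列折返し"""
--     if not file_list:
--         return ""
--     if len(file_list) == 1:
--         return rf"\begin{{center}}\includegraphics[width=0.45\textwidth]{{{file_list[0]}}}\end{{center}}"
--     if len(file_list) == 2:
--         a, b = file_list[0], file_list[1]
--         return (
--             r"\begin{center}"
--             rf"\includegraphics[width=0.45\textwidth]{{{a}}}"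
--             rf"\includegraphics[width=0.45\textwidth]{{{b}}}"
--             r"\end{center}"
--         )
--     # 3枚以上の場合
--     out = [r"\begin{center}"]
--     for i, fn in enumerate(file_list):
--         out.append(rf"\includegraphics[width=0.45\textwidth]{{{fn}}}")
--         # 2枚ごと（奇数インデックス）に改行コマンドを追加（最後の画像の後には不要）
--         if i % 2 == 1 and i != len(file_list) - 1:
--             out.append(r"\\[0.5ex]")
--     out.append(r"\end{center}")
--     return "\n".join(out)
-- ===== SOURCE B (Python) =====
-- def _image_block_latex(file_list):
--     if not file_list:
--         return ""
--     if len(file_list) <= 2: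
--         body = "".join(
--             rf"\includegraphics[width=0.45\textwidth]{{{fn}}}" for fn in file_list
--         )
--         return r"\begin{center}" + body + r"\end{center}"
--     rows = [file_list[i:i + 2] for i in range(0, len(file_list), 2)]
--     body = ("\n" + "\\\\[0.5ex]" + "\n").join(
--         "\n".join(rf"\includegraphics[width=0.45\textwidth]{{{fn}}}" for fn in row)
--         for row in rows
--     )
--     return "\\begin{center}\n" + body + "\n\\end{center}"
-- ===== Notes on version B (the rewrite author's own statement) =====
-- stated objective: alternative
-- what changed: Replaces A's flat enumerate loop with an index-parity test (and separate 1- and 2-image branches) by chunking the list into rows of two, rendering each row and joining rows with the line-break separator; the 1- and 2-image cases are merged into one join-based branch.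
import Mathlib
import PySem

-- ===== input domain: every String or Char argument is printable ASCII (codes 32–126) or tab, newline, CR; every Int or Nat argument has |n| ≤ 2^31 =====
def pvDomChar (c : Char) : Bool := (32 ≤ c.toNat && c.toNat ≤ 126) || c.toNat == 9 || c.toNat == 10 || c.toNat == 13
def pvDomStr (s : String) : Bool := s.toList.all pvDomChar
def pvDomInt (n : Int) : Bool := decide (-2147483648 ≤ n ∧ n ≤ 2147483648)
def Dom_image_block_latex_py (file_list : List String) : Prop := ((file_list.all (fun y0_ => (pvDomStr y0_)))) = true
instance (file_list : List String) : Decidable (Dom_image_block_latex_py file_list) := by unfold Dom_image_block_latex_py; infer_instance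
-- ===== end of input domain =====

-- B restructures A's flat index-parity loop into pairwise rows joined by the break separator;
-- objective: alternative decomposition (same cost), byte-for-byte equal output.

-- ===== PORT A =====
-- \includegraphics[width=0.45\textwidth]{fn}
def igA (fn : String) : String := "\\includegraphics[width=0.45\\textwidth]{" ++ fn ++ "}"

def image_block_latex_py (file_list : List String) : String :=
  if file_list = [] then ""
  else if file_list.length = 1 then
    "\\begin{center}" ++ igA (file_list.getD 0 "") ++ "\\end{center}"
  else if file_list.length = 2 then
    let a := file_list.getD 0 ""
    let b := file_list.getD 1 ""
    "\\begin{center}" ++ igA a ++ igA b ++ "\\end{center}"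
  else
    -- for i, fn in enumerate(file_list): append image; after odd i (except the last) append "\\[0.5ex]"
    let out := (file_list.zipIdx).foldl
      (fun out p =>
        let out := out ++ [igA p.1]
        if p.2 % 2 == 1 && p.2 != file_list.length - 1 then out ++ ["\\\\[0.5ex]"] else out)
      ["\\begin{center}"]
    PySem.Str.join "\n" (out ++ ["\\end{center}"])

-- ===== PORT B =====
def igB (fn : String) : String := "\\includegraphics[width=0.45\\textwidth]{" ++ fn ++ "}"

-- rows of two: [l[i:i+2] for i in range(0, len(l), 2)]
def rows2 : List String → List (List String)
  | [] => []
  | [a] => [[a]]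
  | a :: b :: rest => [a, b] :: rows2 rest

def image_block_latex_py_alt (file_list : List String) : String :=
  if file_list = [] then ""
  else if file_list.length ≤ 2 then
    "\\begin{center}" ++ PySem.Str.join "" (file_list.map igB) ++ "\\end{center}"
  else
    let body := PySem.Str.join ("\n" ++ "\\\\[0.5ex]" ++ "\n")
      ((rows2 file_list).map (fun r => PySem.Str.join "\n" (r.map igB)))
    "\\begin{center}\n" ++ body ++ "\n\\end{center}"

-- ===== PRECONDITION & SPEC =====
def Spec_image_block_latex_py (file_list : List String) (out : String) : Prop := out = image_block_latex_py_alt file_list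
instance (file_list : List String) (out : String) : Decidable (Spec_image_block_latex_py file_list out) := by unfold Spec_image_block_latex_py; infer_instance

-- ===== CLAIM (what is proved, stated in full; the proofs are below) =====
def Claim_equal_image_block_latex_py : Prop := ∀ (file_list : List String), Dom_image_block_latex_py file_list → Spec_image_block_latex_py file_list (image_block_latex_py file_list)

-- ===== LEMMAS AND PROOFS =====

theorem igA_eq_igB : igA = igB := rfl

theorem join_singleton (sep a : String) : PySem.Str.join sep [a] = a := by
  apply String.toList_injective
  simp [PySem.Str.toList_join, PySem.Chars.join, List.intercalate]

theorem join_cons_cons (sep a b : String) (r : List String) :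
    PySem.Str.join sep (a :: b :: r) = a ++ sep ++ PySem.Str.join sep (b :: r) := by
  apply String.toList_injective
  simp [PySem.Str.toList_join, PySem.Chars.join_cons_cons]

theorem join_cons_of_ne (sep a : String) (xs : List String) (h : xs ≠ []) :
    PySem.Str.join sep (a :: xs) = a ++ sep ++ PySem.Str.join sep xs := by
  cases xs with
  | nil => exact absurd rfl h
  | cons b r => exact join_cons_cons sep a b r

theorem join_append_singleton (sep e : String) :
    ∀ (xs : List String), xs ≠ [] →
      PySem.Str.join sep (xs ++ [e]) = PySem.Str.join sep xs ++ sep ++ e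
  | [], h => absurd rfl h
  | [x], _ => by
      rw [List.singleton_append, join_cons_cons, join_singleton, join_singleton]
  | x :: y :: ys, _ => by
      rw [List.cons_append, join_cons_of_ne sep x ((y :: ys) ++ [e]) (by simp),
        join_append_singleton sep e (y :: ys) (by simp), join_cons_cons]
      simp [String.append_assoc]

-- A's loop, written as structural recursion carrying the running index
def gRun (n : Nat) : Nat → List String → List String
  | _, [] => []
  | i, fn :: rest =>
      [igA fn] ++ (if i % 2 == 1 && i != n - 1 then ["\\\\[0.5ex]"] else []) ++ gRun n (i + 1) rest

theorem foldA (n : Nat) :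
    ∀ (l : List String) (i : Nat) (acc : List String),
      (l.zipIdx i).foldl
        (fun out p =>
          let out := out ++ [igA p.1]
          if p.2 % 2 == 1 && p.2 != n - 1 then out ++ ["\\\\[0.5ex]"] else out) acc
      = acc ++ gRun n i l := by
  intro l
  induction l with
  | nil => intro i acc; simp [gRun]
  | cons fn rest ih =>
      intro i acc
      simp only [List.zipIdx_cons, List.foldl_cons, gRun]
      split
      · rw [ih]; simp
      · rw [ih]; simp

-- pairwise restatement of A's emitted lines
def pairRec : List String → List String
  | [] => []
  | [a] => [igA a]
  | a :: b :: rest => igA a :: igA b :: ((if rest = [] then [] else ["\\\\[0.5ex]"]) ++ pairRec rest)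

theorem gRun_eq_pairRec :
    ∀ (r : List String) (n i : Nat), i % 2 = 0 → i + r.length = n → gRun n i r = pairRec r
  | [], _, _, _, _ => by simp [gRun, pairRec]
  | [a], n, i, hpar, _ => by
      have h1 : (i % 2 == 1) = false := by simp at *; omega
      simp [gRun, pairRec, h1]
  | a :: b :: rest, n, i, hpar, hlen => by
      have h1 : (i % 2 == 1) = false := by simp; omega
      have h2 : ((i + 1) % 2 == 1) = true := by simp; omega
      have ih := gRun_eq_pairRec rest n (i + 2) (by omega) (by simp at hlen; omega)
      by_cases hr : rest = []
      · subst hr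
        have h3 : ((i + 1) != n - 1) = false := by
          simp at hlen ⊢; omega
        simp [gRun, pairRec, h1, h2, h3]
      · have hlr : 1 ≤ rest.length := by
          cases rest with
          | nil => exact absurd rfl hr
          | cons _ _ => simp
        have h3 : ((i + 1) != n - 1) = true := by
          simp at hlen ⊢; omega
        simp [gRun, pairRec, h1, h2, h3, hr, ih]

theorem pairRec_ne_nil : ∀ (l : List String), l ≠ [] → pairRec l ≠ []
  | [], h => absurd rfl h
  | [_], _ => by simp [pairRec]
  | _ :: _ :: _, _ => by simp [pairRec]

theorem join_pairRec :
    ∀ (l : List String), l ≠ [] →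
      PySem.Str.join "\n" (pairRec l)
        = PySem.Str.join ("\n" ++ "\\\\[0.5ex]" ++ "\n")
            ((rows2 l).map (fun r => PySem.Str.join "\n" (r.map igB)))
  | [], h => absurd rfl h
  | [a], _ => by simp [pairRec, rows2, join_singleton, igA_eq_igB]
  | [a, b], _ => by
      simp only [pairRec, rows2, if_pos, List.map, List.append_nil]
      rw [join_cons_cons, join_singleton, join_singleton, join_cons_cons, join_singleton]
      simp [igA_eq_igB]
  | a :: b :: c :: rest, _ => by
      have hne : (c :: rest) ≠ [] := by simp
      have ih := join_pairRec (c :: rest) hne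
      have hpr : pairRec (c :: rest) ≠ [] := pairRec_ne_nil _ hne
      show PySem.Str.join "\n"
          (igA a :: igA b :: ((if (c :: rest) = [] then [] else ["\\\\[0.5ex]"]) ++ pairRec (c :: rest)))
        = _
      rw [if_neg hne, List.cons_append, List.nil_append]
      rw [join_cons_of_ne _ _ _ (by simp),
          join_cons_of_ne _ _ _ (by simp),
          join_cons_of_ne _ _ _ hpr, ih]
      show _ = PySem.Str.join _ (List.map _ ([a, b] :: rows2 (c :: rest)))
      have hrows : (rows2 (c :: rest)).map (fun r => PySem.Str.join "\n" (r.map igB)) ≠ [] := by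
        cases rest with
        | nil => simp [rows2]
        | cons d ds => cases ds <;> simp [rows2]
      rw [List.map_cons, join_cons_of_ne _ _ _ hrows]
      simp only [List.map_cons, List.map_nil]
      rw [join_cons_cons, join_singleton]
      simp [igA_eq_igB, String.append_assoc]
      apply String.toList_injective
      simp

-- ===== VERDICT (by name: the statement is the Claim_ definition above) =====
theorem image_block_latex_py_spec : Claim_equal_image_block_latex_py := by
  intro file_list _
  unfold Spec_image_block_latex_py image_block_latex_py image_block_latex_py_alt
  match file_list with
  | [] => simp
  | [a] =>
      norm_num
      rw [join_singleton]
      rfl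
  | [a, b] =>
      norm_num
      rw [if_neg (List.cons_ne_nil a [b]), if_neg (List.cons_ne_nil a [b]),
          join_cons_cons, join_singleton]
      apply String.toList_injective
      simp [igA, igB]
  | a :: b :: c :: rest =>
      have hlen : (a :: b :: c :: rest).length = rest.length + 3 := by simp
      rw [if_neg (by simp), if_neg (by simp [hlen]), if_neg (by simp [hlen]),
          if_neg (by simp), if_neg (by simp)]
      simp only []
      rw [foldA (a :: b :: c :: rest).length (a :: b :: c :: rest) 0 ["\\begin{center}"],
          gRun_eq_pairRec _ _ 0 rfl (by simp)]
      have hpr : pairRec (a :: b :: c :: rest) ≠ [] := pairRec_ne_nil _ (by simp)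
      simp only [List.cons_append, List.nil_append]
      rw [join_cons_of_ne "\n" "\\begin{center}"
            (pairRec (a :: b :: c :: rest) ++ ["\\end{center}"]) (by simp),
          join_append_singleton _ _ _ hpr,
          join_pairRec (a :: b :: c :: rest) (by simp)]
      apply String.toList_injective
      simp
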